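-- pv_equiv track=rewrite | github.com/kacperklusek/ASD | dynamic/black_forest.py | forest
-- ===== SOURCE A (Python) =====
-- def forest(T):
--     n = len(T)
--     F = [0 for i in range(n)]
--     F[n-1], F[n-2], F[n-3] = T[n-1], T[n-2], T[n-3] + T[n-1]
--
--     for i in range(n-4, -1, -1):
--         F[i] = max(T[i] + F[i+2], T[i] + F[i+3])
--
--     to_cut = []
--     s = m = 0 if F[0] > F[1] else 1
--     while s < n-2:
--         to_cut.append(T[s])
--         if F[s] == F[s+2] + T[s]:
--             s = s+2
--         else:
--             s = s+3
--
--     if s < n: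
--         to_cut.append(T[s])
--
--     return F[m], to_cut
-- ===== SOURCE B (Python) =====
-- def forest(T):
--     n = len(T)
--     # best[i] = (value, chain): best total from i taking T[i], chain shares tails (cons cells as pairs)
--     best = [None] * n
--     best[n-1] = (T[n-1], (T[n-1], None))
--     best[n-2] = (T[n-2], (T[n-2], None))
--     best[n-3] = (T[n-3] + T[n-1], (T[n-3], (T[n-1], None)))
--     for i in range(n-4, -1, -1):
--         v2, c2 = best[i+2]
--         v3, c3 = best[i+3]
--         if v2 >= v3:
--             best[i] = (T[i] + v2, (T[i], c2))
--         else: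
--             best[i] = (T[i] + v3, (T[i], c3))
--     v, c = best[0] if best[0][0] > best[1][0] else best[1]
--     out = []
--     while c is not None:
--         out.append(c[0])
--         c = c[1]
--     return v, out
-- ===== Notes on version B (the rewrite author's own statement) =====
-- stated objective: alternative
-- what changed: B carries a shared cons-chain of the chosen trees through the single backward DP pass, so A's separate forward reconstruction walk (which re-tests the DP equality F[s]==F[s+2]+T[s] at every step) disappears; the answer list is read off the stored chain.
-- outside the precondition, e.g. on forest([1, 1]): A returns (2, [1]), B returns (2, [1, 1]); on forest([5]): A raises IndexError, B raises IndexError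
import Mathlib
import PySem

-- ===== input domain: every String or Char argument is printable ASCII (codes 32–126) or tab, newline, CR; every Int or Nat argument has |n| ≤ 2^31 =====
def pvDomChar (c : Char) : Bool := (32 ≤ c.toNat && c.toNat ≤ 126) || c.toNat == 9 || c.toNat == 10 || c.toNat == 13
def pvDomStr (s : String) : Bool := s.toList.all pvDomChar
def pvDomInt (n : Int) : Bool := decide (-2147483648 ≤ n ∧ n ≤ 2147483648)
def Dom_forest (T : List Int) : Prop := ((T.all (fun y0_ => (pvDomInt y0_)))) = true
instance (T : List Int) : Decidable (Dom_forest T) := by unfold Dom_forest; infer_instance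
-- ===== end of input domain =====

-- B replaces A's separate reconstruction walk by carrying a shared cons-chain of the chosen
-- trees through the single backward DP pass (objective: alternative decomposition, same cost).

-- ===== PORT A =====
-- Python indexing T[i] / F[i] as a total function; Pre_forest keeps every used index in range.
def pvGetI (xs : List Int) (i : Int) : Int := PySem.List.pyGetD xs i 0

-- the body of A's 'for i in range(n-4, -1, -1)' loop
def pvStepA (T F : List Int) (i : Int) : List Int :=
  PySem.List.pySetD F i (max (pvGetI T i + pvGetI F (i + 2)) (pvGetI T i + pvGetI F (i + 3)))

-- A's 'while s < n-2: …' followed by 'if s < n: to_cut.append(T[s])'; fuel = len(T) is enough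
-- under Pre_forest because s grows by at least 2 each iteration.
def pvWalkA (T F : List Int) (fuel : Nat) (s : Int) (acc : List Int) : List Int :=
  match fuel with
  | 0 => acc
  | Nat.succ fuel =>
    if s < (T.length : Int) - 2 then
      let acc2 := acc ++ [pvGetI T s]
      if pvGetI F s = pvGetI F (s + 2) + pvGetI T s then pvWalkA T F fuel (s + 2) acc2
      else pvWalkA T F fuel (s + 3) acc2
    else if s < (T.length : Int) then acc ++ [pvGetI T s] else acc

def forest (T : List Int) : Int × List Int :=
  let n : Int := (T.length : Int)
  let F0 : List Int := (PySem.List.pyRange 0 n 1).map (fun _ => (0 : Int))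
  let F1 := PySem.List.pySetD F0 (n - 1) (pvGetI T (n - 1))
  let F2 := PySem.List.pySetD F1 (n - 2) (pvGetI T (n - 2))
  let F3 := PySem.List.pySetD F2 (n - 3) (pvGetI T (n - 3) + pvGetI T (n - 1))
  let F := (PySem.List.pyRange (n - 4) (-1) (-1)).foldl (pvStepA T) F3
  let m : Int := if pvGetI F 0 > pvGetI F 1 then 0 else 1
  (pvGetI F m, pvWalkA T F T.length m [])

-- ===== PORT B =====
-- Source B's cons-cells '(x, rest)' / 'None'
inductive PvChain where
  | nil : PvChain
  | cons : Int → PvChain → PvChain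
deriving DecidableEq, Repr

-- Source B's final 'while c is not None: out.append(c[0]); c = c[1]'
def PvChain.flatten : PvChain → List Int
  | .nil => []
  | .cons x c => x :: c.flatten

def pvGetB (xs : List (Int × PvChain)) (i : Int) : Int × PvChain :=
  PySem.List.pyGetD xs i (0, PvChain.nil)

-- the body of Source B's backward loop
def pvStepB (T : List Int) (best : List (Int × PvChain)) (i : Int) : List (Int × PvChain) :=
  let p2 := pvGetB best (i + 2)
  let p3 := pvGetB best (i + 3)
  if p2.1 ≥ p3.1 then
    PySem.List.pySetD best i (pvGetI T i + p2.1, PvChain.cons (pvGetI T i) p2.2)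
  else
    PySem.List.pySetD best i (pvGetI T i + p3.1, PvChain.cons (pvGetI T i) p3.2)

def forest_alt (T : List Int) : Int × List Int :=
  let n : Int := (T.length : Int)
  let b0 : List (Int × PvChain) := (PySem.List.pyRange 0 n 1).map (fun _ => ((0 : Int), PvChain.nil))
  let b1 := PySem.List.pySetD b0 (n - 1) (pvGetI T (n - 1), PvChain.cons (pvGetI T (n - 1)) PvChain.nil)
  let b2 := PySem.List.pySetD b1 (n - 2) (pvGetI T (n - 2), PvChain.cons (pvGetI T (n - 2)) PvChain.nil)
  let b3 := PySem.List.pySetD b2 (n - 3)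
    (pvGetI T (n - 3) + pvGetI T (n - 1),
     PvChain.cons (pvGetI T (n - 3)) (PvChain.cons (pvGetI T (n - 1)) PvChain.nil))
  let best := (PySem.List.pyRange (n - 4) (-1) (-1)).foldl (pvStepB T) b3
  let vc := if (pvGetB best 0).1 > (pvGetB best 1).1 then pvGetB best 0 else pvGetB best 1
  (vc.1, vc.2.flatten)

-- ===== PRECONDITION & SPEC =====
-- Pre_ excludes lists shorter than 3: for length ≤ 1 both programs raise IndexError, and for
-- length 2 A's returned value arises only from Python's accidental negative-index wraparound.
def Pre_forest (T : List Int) : Prop := 3 ≤ T.length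
instance (T : List Int) : Decidable (Pre_forest T) := by unfold Pre_forest; infer_instance
def pvWitness_forest : List Int := [1, 2, 3]

def Spec_forest (T : List Int) (out : Int × List Int) : Prop := out = forest_alt T
instance (T : List Int) (out : Int × List Int) : Decidable (Spec_forest T out) := by unfold Spec_forest; infer_instance

-- ===== CLAIM (what is proved, stated in full; the proofs are below) =====
def Claim_equal_forest : Prop := ∀ (T : List Int), Dom_forest T → Pre_forest T → Spec_forest T (forest T)

-- ===== LEMMAS AND PROOFS =====

-- the common mathematical recurrence: pvG T i = (best value starting at i, chosen trees)
def pvT (T : List Int) (j : Nat) : Int := T.getD j 0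

def pvG (T : List Int) (i : Nat) : Int × List Int :=
  if _h1 : i + 1 = T.length then (pvT T i, [pvT T i])
  else if _h2 : i + 2 = T.length then (pvT T i, [pvT T i])
  else if _h3 : i + 3 = T.length then (pvT T i + pvT T (i + 2), [pvT T i, pvT T (i + 2)])
  else if _h4 : i + 4 ≤ T.length then
    let g2 := pvG T (i + 2)
    let g3 := pvG T (i + 3)
    if g2.1 ≥ g3.1 then (pvT T i + g2.1, pvT T i :: g2.2) else (pvT T i + g3.1, pvT T i :: g3.2)
  else (0, [])
termination_by T.length - i
decreasing_by all_goals omega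

def pvToChain : List Int → PvChain
  | [] => PvChain.nil
  | x :: l => PvChain.cons x (pvToChain l)

theorem pv_flatten_toChain (l : List Int) : (pvToChain l).flatten = l := by
  induction l with
  | nil => rfl
  | cons x l ih => simp [pvToChain, PvChain.flatten, ih]

theorem pvGetI_natCast (xs : List Int) (j : Nat) : pvGetI xs (j : Int) = xs.getD j 0 := by
  simp [pvGetI]

-- value of pvG at the three base indices and in the recursive case
theorem pvG_base1 (T : List Int) (h : 3 ≤ T.length) : pvG T (T.length - 1) = (pvT T (T.length - 1), [pvT T (T.length - 1)]) := by
  rw [pvG]; simp only []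
  rw [dif_pos (by omega)]

theorem pvG_base2 (T : List Int) (h : 3 ≤ T.length) : pvG T (T.length - 2) = (pvT T (T.length - 2), [pvT T (T.length - 2)]) := by
  rw [pvG]
  rw [dif_neg (by omega), dif_pos (by omega)]

theorem pvG_base3 (T : List Int) (h : 3 ≤ T.length) :
    pvG T (T.length - 3) = (pvT T (T.length - 3) + pvT T (T.length - 1), [pvT T (T.length - 3), pvT T (T.length - 1)]) := by
  rw [pvG]
  rw [dif_neg (by omega), dif_neg (by omega), dif_pos (by omega)]
  have : T.length - 3 + 2 = T.length - 1 := by omega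
  rw [this]

theorem pvG_rec (T : List Int) (i : Nat) (h : i + 4 ≤ T.length) :
    pvG T i = if (pvG T (i + 2)).1 ≥ (pvG T (i + 3)).1
      then (pvT T i + (pvG T (i + 2)).1, pvT T i :: (pvG T (i + 2)).2)
      else (pvT T i + (pvG T (i + 3)).1, pvT T i :: (pvG T (i + 3)).2) := by
  rw [pvG]
  rw [dif_neg (by omega), dif_neg (by omega), dif_neg (by omega), dif_pos h]

-- ===== A-side =====

-- proof-side names for the arrays A builds (definitionally equal to the let-bound terms in `forest`)
def pvF3 (T : List Int) : List Int :=
  PySem.List.pySetD (PySem.List.pySetD (PySem.List.pySetD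
      ((PySem.List.pyRange 0 (T.length : Int) 1).map (fun _ => (0 : Int)))
      ((T.length : Int) - 1) (pvGetI T ((T.length : Int) - 1)))
      ((T.length : Int) - 2) (pvGetI T ((T.length : Int) - 2)))
      ((T.length : Int) - 3) (pvGetI T ((T.length : Int) - 3) + pvGetI T ((T.length : Int) - 1))

def pvFoldF (T : List Int) : List Int :=
  (PySem.List.pyRange ((T.length : Int) - 4) (-1) (-1)).foldl (pvStepA T) (pvF3 T)

theorem pvF3_len (T : List Int) : (pvF3 T).length = T.length := by
  simp [pvF3]

theorem pvF3_val (T : List Int) (hn : 3 ≤ T.length) :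
    ∀ j : Nat, T.length < j + 4 → j < T.length → pvGetI (pvF3 T) (j : Int) = (pvG T j).1 := by
  intro j h1 h2
  have e1 : ((T.length : Int) - 1) = ((T.length - 1 : Nat) : Int) := by omega
  have e2 : ((T.length : Int) - 2) = ((T.length - 2 : Nat) : Int) := by omega
  have e3 : ((T.length : Int) - 3) = ((T.length - 3 : Nat) : Int) := by omega
  have hF0 : ((PySem.List.pyRange 0 (T.length : Int) 1).map (fun _ => (0 : Int)))
      = List.replicate T.length 0 := by
    rw [PySem.List.pyRange_zero_nat]
    simp [Function.comp_def, List.map_const']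
  unfold pvF3
  rw [e1, e2, e3, hF0, pvGetI]
  have l1 : T.length - 1 < (List.replicate T.length (0 : Int)).length := by simp; omega
  have l2 : T.length - 2 < (PySem.List.pySetD (List.replicate T.length (0 : Int))
      ((T.length - 1 : Nat) : Int) (pvGetI T ((T.length - 1 : Nat) : Int))).length := by
    simp; omega
  have l3 : T.length - 3 < (PySem.List.pySetD (PySem.List.pySetD (List.replicate T.length (0 : Int))
      ((T.length - 1 : Nat) : Int) (pvGetI T ((T.length - 1 : Nat) : Int)))
      ((T.length - 2 : Nat) : Int) (pvGetI T ((T.length - 2 : Nat) : Int))).length := by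
    simp; omega
  have hj : j = T.length - 3 ∨ j = T.length - 2 ∨ j = T.length - 1 := by omega
  rcases hj with hj | hj | hj
  · rw [PySem.List.pyGetD_pySetD_natCast _ _ _ _ _ l3, if_pos hj, hj]
    rw [pvG_base3 T hn]
    have t3 : pvGetI T ((T.length - 3 : Nat) : Int) = pvT T (T.length - 3) := pvGetI_natCast T _
    have t1 : pvGetI T ((T.length - 1 : Nat) : Int) = pvT T (T.length - 1) := pvGetI_natCast T _
    rw [t3, t1]
  · rw [PySem.List.pyGetD_pySetD_natCast _ _ _ _ _ l3, if_neg (by omega),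
        PySem.List.pyGetD_pySetD_natCast _ _ _ _ _ l2, if_pos hj, hj]
    rw [pvG_base2 T hn]
    exact pvGetI_natCast T _
  · rw [PySem.List.pyGetD_pySetD_natCast _ _ _ _ _ l3, if_neg (by omega),
        PySem.List.pyGetD_pySetD_natCast _ _ _ _ _ l2, if_neg (by omega),
        PySem.List.pyGetD_pySetD_natCast _ _ _ _ _ l1, if_pos hj, hj]
    rw [pvG_base1 T hn]
    exact pvGetI_natCast T _

theorem pvStepA_inv (T F : List Int) (k : Nat) (hk : k + 4 ≤ T.length) (hlen : F.length = T.length)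
    (hinv : ∀ j : Nat, k < j → j < T.length → pvGetI F (j : Int) = (pvG T j).1) :
    (pvStepA T F (k : Int)).length = T.length ∧
    (∀ j : Nat, j = k ∨ (k < j ∧ j < T.length) → pvGetI (pvStepA T F (k : Int)) (j : Int) = (pvG T j).1) := by
  have hkF : k < F.length := by omega
  have h2 : pvGetI F ((k : Int) + 2) = (pvG T (k + 2)).1 := by
    have h := hinv (k + 2) (by omega) (by omega)
    rw [← h]; norm_cast
  have h3 : pvGetI F ((k : Int) + 3) = (pvG T (k + 3)).1 := by
    have h := hinv (k + 3) (by omega) (by omega)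
    rw [← h]; norm_cast
  have hT : pvGetI T (k : Int) = pvT T k := pvGetI_natCast T k
  have hv : max (pvGetI T (k : Int) + pvGetI F ((k : Int) + 2)) (pvGetI T (k : Int) + pvGetI F ((k : Int) + 3))
      = (pvG T k).1 := by
    rw [h2, h3, pvG_rec T k hk]
    split_ifs with hc <;> simp <;> omega
  constructor
  · simp [pvStepA, hlen]
  · intro j hj
    have hmain : pvGetI (pvStepA T F (k : Int)) (j : Int)
        = if j = k then max (pvGetI T (k : Int) + pvGetI F ((k : Int) + 2)) (pvGetI T (k : Int) + pvGetI F ((k : Int) + 3))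
          else pvGetI F (j : Int) := by
      simp only [pvStepA, pvGetI]
      rw [PySem.List.pyGetD_pySetD_natCast _ _ _ _ _ hkF]
    rcases hj with hj | ⟨hjk, hjn⟩
    · subst hj
      rw [hmain, if_pos rfl]
      exact hv
    · rw [hmain, if_neg (by omega)]
      exact hinv j hjk hjn

theorem pvFoldA (T : List Int) (k : Nat) (hk : k + 4 ≤ T.length) :
    ∀ (F : List Int), F.length = T.length →
    (∀ j : Nat, k < j → j < T.length → pvGetI F (j : Int) = (pvG T j).1) →
    (((PySem.List.pyRange (k : Int) (-1) (-1)).foldl (pvStepA T) F).length = T.length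
     ∧ ∀ j : Nat, j < T.length →
        pvGetI ((PySem.List.pyRange (k : Int) (-1) (-1)).foldl (pvStepA T) F) (j : Int) = (pvG T j).1) := by
  induction k with
  | zero =>
    intro F hlen hinv
    rw [PySem.List.pyRange_neg_one_cons (by omega)]
    rw [PySem.List.pyRange_neg_one_eq_nil (by omega)]
    simp only [List.foldl_cons, List.foldl_nil, Nat.cast_zero]
    obtain ⟨hl, hv⟩ := pvStepA_inv T F 0 hk hlen hinv
    simp only [Nat.cast_zero] at hl hv
    exact ⟨hl, fun j hj => hv j (by omega)⟩
  | succ k ih =>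
    intro F hlen hinv
    rw [PySem.List.pyRange_neg_one_cons (by omega)]
    simp only [List.foldl_cons]
    have e1 : ((k + 1 : Nat) : Int) - 1 = (k : Int) := by omega
    rw [e1]
    obtain ⟨hl, hv⟩ := pvStepA_inv T F (k + 1) hk hlen hinv
    exact ih (by omega) _ hl (fun j hjk hjn => hv j (by omega))

theorem pvFoldF_val (T : List Int) (hn : 3 ≤ T.length) :
    ∀ j : Nat, j < T.length → pvGetI (pvFoldF T) (j : Int) = (pvG T j).1 := by
  unfold pvFoldF
  by_cases h4 : 4 ≤ T.length
  · have ecast : ((T.length : Int) - 4) = ((T.length - 4 : Nat) : Int) := by omega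
    rw [ecast]
    exact (pvFoldA T (T.length - 4) (by omega) (pvF3 T) (pvF3_len T)
      (fun j hjk hjn => pvF3_val T hn j (by omega) hjn)).2
  · rw [PySem.List.pyRange_neg_one_eq_nil (by omega)]
    simp only [List.foldl_nil]
    intro j hj
    exact pvF3_val T hn j (by omega) hj

theorem pvWalkA_eq (T F : List Int) (h3 : 3 ≤ T.length)
    (hF : ∀ j : Nat, j < T.length → pvGetI F (j : Int) = (pvG T j).1) :
    ∀ (fuel : Nat) (s : Nat) (acc : List Int), s < T.length → T.length - s ≤ fuel →
    pvWalkA T F fuel (s : Int) acc = acc ++ (pvG T s).2 := by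
  intro fuel
  induction fuel with
  | zero => intro s acc hs hf; omega
  | succ fuel ih =>
    intro s acc hs hf
    rw [pvWalkA]
    have hTs : pvGetI T (s : Int) = pvT T s := pvGetI_natCast T s
    by_cases hb : s + 3 ≤ T.length
    · rw [if_pos (by omega)]
      have hs0 : pvGetI F (s : Int) = (pvG T s).1 := hF s hs
      have hs2 : pvGetI F ((s : Int) + 2) = (pvG T (s + 2)).1 := by
        have h := hF (s + 2) (by omega); rw [← h]; norm_cast
      have ec2 : (s : Int) + 2 = ((s + 2 : Nat) : Int) := by push_cast; ring
      have ec3 : (s : Int) + 3 = ((s + 3 : Nat) : Int) := by push_cast; ring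
      by_cases hb3 : s + 3 = T.length
      · -- s = n-3: the test holds, step +2 to n-1
        have hsn : s = T.length - 3 := by omega
        have hg : pvG T s = (pvT T s + pvT T (s + 2), [pvT T s, pvT T (s + 2)]) := by
          rw [hsn, pvG_base3 T h3]
          have e : T.length - 3 + 2 = T.length - 1 := by omega
          rw [e]
        have hg2 : pvG T (s + 2) = (pvT T (s + 2), [pvT T (s + 2)]) := by
          have e : s + 2 = T.length - 1 := by omega
          rw [e, pvG_base1 T h3]
        rw [if_pos (by rw [hs0, hs2, hTs, hg, hg2]; simp; omega)]
        rw [ec2, ih (s + 2) _ (by omega) (by omega)]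
        rw [hg, hg2, hTs]
        simp
      · -- s + 4 ≤ n: recursive case of pvG
        have hb4 : s + 4 ≤ T.length := by omega
        have hgr := pvG_rec T s hb4
        by_cases hc : (pvG T (s + 2)).1 ≥ (pvG T (s + 3)).1
        · rw [if_pos (by rw [hs0, hs2, hTs, hgr, if_pos hc]; simp; omega)]
          rw [ec2, ih (s + 2) _ (by omega) (by omega)]
          rw [hgr, if_pos hc, hTs]
          simp
        · rw [if_neg (by rw [hs0, hs2, hTs, hgr, if_neg hc]; simp; omega)]
          rw [ec3, ih (s + 3) _ (by omega) (by omega)]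
          rw [hgr, if_neg hc, hTs]
          simp
    · rw [if_neg (by omega), if_pos (by omega)]
      rcases (by omega : s + 1 = T.length ∨ s + 2 = T.length) with h | h
      · have e : s = T.length - 1 := by omega
        rw [hTs, e, pvG_base1 T h3]
      · have e : s = T.length - 2 := by omega
        rw [hTs, e, pvG_base2 T h3]

theorem pvForestA (T : List Int) (hn : 3 ≤ T.length) :
    forest T = if (pvG T 0).1 > (pvG T 1).1 then pvG T 0 else pvG T 1 := by
  have hA : forest T =
      (pvGetI (pvFoldF T) (if pvGetI (pvFoldF T) 0 > pvGetI (pvFoldF T) 1 then 0 else 1),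
       pvWalkA T (pvFoldF T) T.length (if pvGetI (pvFoldF T) 0 > pvGetI (pvFoldF T) 1 then 0 else 1) []) := rfl
  have h0 : pvGetI (pvFoldF T) 0 = (pvG T 0).1 := by
    have := pvFoldF_val T hn 0 (by omega); simpa using this
  have h1 : pvGetI (pvFoldF T) 1 = (pvG T 1).1 := by
    have := pvFoldF_val T hn 1 (by omega); simpa using this
  rw [hA, h0, h1]
  split_ifs with hc
  · have hw := pvWalkA_eq T (pvFoldF T) hn (pvFoldF_val T hn) T.length 0 [] (by omega) (by omega)
    simp only [Nat.cast_zero, List.nil_append] at hw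
    rw [hw, h0]
  · have hw := pvWalkA_eq T (pvFoldF T) hn (pvFoldF_val T hn) T.length 1 [] (by omega) (by omega)
    simp only [Nat.cast_one, List.nil_append] at hw
    rw [hw, h1]

-- ===== B-side =====

def pvGB (T : List Int) (j : Nat) : Int × PvChain := ((pvG T j).1, pvToChain (pvG T j).2)

def pvB3 (T : List Int) : List (Int × PvChain) :=
  PySem.List.pySetD (PySem.List.pySetD (PySem.List.pySetD
      ((PySem.List.pyRange 0 (T.length : Int) 1).map (fun _ => ((0 : Int), PvChain.nil)))
      ((T.length : Int) - 1) (pvGetI T ((T.length : Int) - 1), PvChain.cons (pvGetI T ((T.length : Int) - 1)) PvChain.nil))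
      ((T.length : Int) - 2) (pvGetI T ((T.length : Int) - 2), PvChain.cons (pvGetI T ((T.length : Int) - 2)) PvChain.nil))
      ((T.length : Int) - 3)
      (pvGetI T ((T.length : Int) - 3) + pvGetI T ((T.length : Int) - 1),
       PvChain.cons (pvGetI T ((T.length : Int) - 3)) (PvChain.cons (pvGetI T ((T.length : Int) - 1)) PvChain.nil))

def pvFoldBst (T : List Int) : List (Int × PvChain) :=
  (PySem.List.pyRange ((T.length : Int) - 4) (-1) (-1)).foldl (pvStepB T) (pvB3 T)

theorem pvB3_len (T : List Int) : (pvB3 T).length = T.length := by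
  simp [pvB3]

theorem pvB3_val (T : List Int) (hn : 3 ≤ T.length) :
    ∀ j : Nat, T.length < j + 4 → j < T.length → pvGetB (pvB3 T) (j : Int) = pvGB T j := by
  intro j h1 h2
  have e1 : ((T.length : Int) - 1) = ((T.length - 1 : Nat) : Int) := by omega
  have e2 : ((T.length : Int) - 2) = ((T.length - 2 : Nat) : Int) := by omega
  have e3 : ((T.length : Int) - 3) = ((T.length - 3 : Nat) : Int) := by omega
  have hF0 : ((PySem.List.pyRange 0 (T.length : Int) 1).map (fun _ => ((0 : Int), PvChain.nil)))
      = List.replicate T.length ((0 : Int), PvChain.nil) := by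
    rw [PySem.List.pyRange_zero_nat]
    simp [Function.comp_def, List.map_const']
  unfold pvB3
  rw [e1, e2, e3, hF0, pvGetB]
  have l1 : T.length - 1 < (List.replicate T.length ((0 : Int), PvChain.nil)).length := by simp; omega
  have l2 : T.length - 2 < (PySem.List.pySetD (List.replicate T.length ((0 : Int), PvChain.nil))
      ((T.length - 1 : Nat) : Int)
      (pvGetI T ((T.length - 1 : Nat) : Int), PvChain.cons (pvGetI T ((T.length - 1 : Nat) : Int)) PvChain.nil)).length := by
    simp; omega
  have l3 : T.length - 3 < (PySem.List.pySetD (PySem.List.pySetD (List.replicate T.length ((0 : Int), PvChain.nil))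
      ((T.length - 1 : Nat) : Int)
      (pvGetI T ((T.length - 1 : Nat) : Int), PvChain.cons (pvGetI T ((T.length - 1 : Nat) : Int)) PvChain.nil))
      ((T.length - 2 : Nat) : Int)
      (pvGetI T ((T.length - 2 : Nat) : Int), PvChain.cons (pvGetI T ((T.length - 2 : Nat) : Int)) PvChain.nil)).length := by
    simp; omega
  have hj : j = T.length - 3 ∨ j = T.length - 2 ∨ j = T.length - 1 := by omega
  rcases hj with hj | hj | hj
  · rw [PySem.List.pyGetD_pySetD_natCast _ _ _ _ _ l3, if_pos hj, hj]
    unfold pvGB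
    rw [pvG_base3 T hn]
    have t3 : pvGetI T ((T.length - 3 : Nat) : Int) = pvT T (T.length - 3) := pvGetI_natCast T _
    have t1 : pvGetI T ((T.length - 1 : Nat) : Int) = pvT T (T.length - 1) := pvGetI_natCast T _
    rw [t3, t1]
    rfl
  · rw [PySem.List.pyGetD_pySetD_natCast _ _ _ _ _ l3, if_neg (by omega),
        PySem.List.pyGetD_pySetD_natCast _ _ _ _ _ l2, if_pos hj, hj]
    unfold pvGB
    rw [pvG_base2 T hn]
    have t2 : pvGetI T ((T.length - 2 : Nat) : Int) = pvT T (T.length - 2) := pvGetI_natCast T _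
    rw [t2]
    rfl
  · rw [PySem.List.pyGetD_pySetD_natCast _ _ _ _ _ l3, if_neg (by omega),
        PySem.List.pyGetD_pySetD_natCast _ _ _ _ _ l2, if_neg (by omega),
        PySem.List.pyGetD_pySetD_natCast _ _ _ _ _ l1, if_pos hj, hj]
    unfold pvGB
    rw [pvG_base1 T hn]
    have t1 : pvGetI T ((T.length - 1 : Nat) : Int) = pvT T (T.length - 1) := pvGetI_natCast T _
    rw [t1]
    rfl

theorem pvStepB_inv (T : List Int) (best : List (Int × PvChain)) (k : Nat)
    (hk : k + 4 ≤ T.length) (hlen : best.length = T.length)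
    (hinv : ∀ j : Nat, k < j → j < T.length → pvGetB best (j : Int) = pvGB T j) :
    (pvStepB T best (k : Int)).length = T.length ∧
    (∀ j : Nat, j = k ∨ (k < j ∧ j < T.length) → pvGetB (pvStepB T best (k : Int)) (j : Int) = pvGB T j) := by
  have hkF : k < best.length := by omega
  have h2 : pvGetB best ((k : Int) + 2) = pvGB T (k + 2) := by
    have h := hinv (k + 2) (by omega) (by omega)
    rw [← h]; norm_cast
  have h3 : pvGetB best ((k : Int) + 3) = pvGB T (k + 3) := by
    have h := hinv (k + 3) (by omega) (by omega)
    rw [← h]; norm_cast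
  have hT : pvGetI T (k : Int) = pvT T k := pvGetI_natCast T k
  have hsplit : pvStepB T best (k : Int) = PySem.List.pySetD best (k : Int)
      (if (pvGetB best ((k : Int) + 2)).1 ≥ (pvGetB best ((k : Int) + 3)).1
       then (pvGetI T (k : Int) + (pvGetB best ((k : Int) + 2)).1,
             PvChain.cons (pvGetI T (k : Int)) (pvGetB best ((k : Int) + 2)).2)
       else (pvGetI T (k : Int) + (pvGetB best ((k : Int) + 3)).1,
             PvChain.cons (pvGetI T (k : Int)) (pvGetB best ((k : Int) + 3)).2)) := by
    simp only [pvStepB]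
    split_ifs <;> rfl
  have hv : (if (pvGetB best ((k : Int) + 2)).1 ≥ (pvGetB best ((k : Int) + 3)).1
       then (pvGetI T (k : Int) + (pvGetB best ((k : Int) + 2)).1,
             PvChain.cons (pvGetI T (k : Int)) (pvGetB best ((k : Int) + 2)).2)
       else (pvGetI T (k : Int) + (pvGetB best ((k : Int) + 3)).1,
             PvChain.cons (pvGetI T (k : Int)) (pvGetB best ((k : Int) + 3)).2)) = pvGB T k := by
    rw [h2, h3, hT]
    unfold pvGB
    rw [pvG_rec T k hk]
    by_cases hc : (pvG T (k + 2)).1 ≥ (pvG T (k + 3)).1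
    · rw [if_pos hc, if_pos hc]
      rfl
    · rw [if_neg hc, if_neg hc]
      rfl
  constructor
  · rw [hsplit]; simp [hlen]
  · intro j hj
    have hmain : pvGetB (pvStepB T best (k : Int)) (j : Int)
        = if j = k then (if (pvGetB best ((k : Int) + 2)).1 ≥ (pvGetB best ((k : Int) + 3)).1
             then (pvGetI T (k : Int) + (pvGetB best ((k : Int) + 2)).1,
                   PvChain.cons (pvGetI T (k : Int)) (pvGetB best ((k : Int) + 2)).2)
             else (pvGetI T (k : Int) + (pvGetB best ((k : Int) + 3)).1,
                   PvChain.cons (pvGetI T (k : Int)) (pvGetB best ((k : Int) + 3)).2))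
          else pvGetB best (j : Int) := by
      rw [hsplit]
      unfold pvGetB
      rw [PySem.List.pyGetD_pySetD_natCast _ _ _ _ _ hkF]
    rcases hj with hj | ⟨hjk, hjn⟩
    · subst hj
      rw [hmain, if_pos rfl]
      exact hv
    · rw [hmain, if_neg (by omega)]
      exact hinv j hjk hjn

theorem pvFoldB (T : List Int) (k : Nat) (hk : k + 4 ≤ T.length) :
    ∀ (best : List (Int × PvChain)), best.length = T.length →
    (∀ j : Nat, k < j → j < T.length → pvGetB best (j : Int) = pvGB T j) →
    (((PySem.List.pyRange (k : Int) (-1) (-1)).foldl (pvStepB T) best).length = T.length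
     ∧ ∀ j : Nat, j < T.length →
        pvGetB ((PySem.List.pyRange (k : Int) (-1) (-1)).foldl (pvStepB T) best) (j : Int) = pvGB T j) := by
  induction k with
  | zero =>
    intro best hlen hinv
    rw [PySem.List.pyRange_neg_one_cons (by omega)]
    rw [PySem.List.pyRange_neg_one_eq_nil (by omega)]
    simp only [List.foldl_cons, List.foldl_nil, Nat.cast_zero]
    obtain ⟨hl, hv⟩ := pvStepB_inv T best 0 hk hlen hinv
    simp only [Nat.cast_zero] at hl hv
    exact ⟨hl, fun j hj => hv j (by omega)⟩
  | succ k ih =>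
    intro best hlen hinv
    rw [PySem.List.pyRange_neg_one_cons (by omega)]
    simp only [List.foldl_cons]
    have e1 : ((k + 1 : Nat) : Int) - 1 = (k : Int) := by omega
    rw [e1]
    obtain ⟨hl, hv⟩ := pvStepB_inv T best (k + 1) hk hlen hinv
    exact ih (by omega) _ hl (fun j hjk hjn => hv j (by omega))

theorem pvFoldBst_val (T : List Int) (hn : 3 ≤ T.length) :
    ∀ j : Nat, j < T.length → pvGetB (pvFoldBst T) (j : Int) = pvGB T j := by
  unfold pvFoldBst
  by_cases h4 : 4 ≤ T.length
  · have ecast : ((T.length : Int) - 4) = ((T.length - 4 : Nat) : Int) := by omega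
    rw [ecast]
    exact (pvFoldB T (T.length - 4) (by omega) (pvB3 T) (pvB3_len T)
      (fun j hjk hjn => pvB3_val T hn j (by omega) hjn)).2
  · rw [PySem.List.pyRange_neg_one_eq_nil (by omega)]
    simp only [List.foldl_nil]
    intro j hj
    exact pvB3_val T hn j (by omega) hj

theorem pvForestB (T : List Int) (hn : 3 ≤ T.length) :
    forest_alt T = if (pvG T 0).1 > (pvG T 1).1 then pvG T 0 else pvG T 1 := by
  have hB : forest_alt T =
      ((if (pvGetB (pvFoldBst T) 0).1 > (pvGetB (pvFoldBst T) 1).1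
          then pvGetB (pvFoldBst T) 0 else pvGetB (pvFoldBst T) 1).1,
       (if (pvGetB (pvFoldBst T) 0).1 > (pvGetB (pvFoldBst T) 1).1
          then pvGetB (pvFoldBst T) 0 else pvGetB (pvFoldBst T) 1).2.flatten) := rfl
  have h0 : pvGetB (pvFoldBst T) 0 = pvGB T 0 := by
    have := pvFoldBst_val T hn 0 (by omega); simpa using this
  have h1 : pvGetB (pvFoldBst T) 1 = pvGB T 1 := by
    have := pvFoldBst_val T hn 1 (by omega); simpa using this
  rw [hB, h0, h1]
  unfold pvGB
  split_ifs with hc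
  · simp [pv_flatten_toChain]
  · simp [pv_flatten_toChain]

-- ===== VERDICT (by name: the statement is the Claim_ definition above) =====
theorem forest_spec : Claim_equal_forest := by
  intro T _hD hP
  unfold Spec_forest
  rw [pvForestA T hP, pvForestB T hP]
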